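-- pv_equiv track=rewrite | github.com/skc2143/w3101-Python | hw1/skc2143-hw1.py | pdp
-- ===== SOURCE A (Python) =====
-- def pdp(v1, v2, pad):
--     length = max(len(v1), len(v2))
--     a = [] + v1
--     b = [] + v2
--     if len(v1) < len(v2):
--         a.extend([pad] * (length - len(v1)))
--     else:
--         b.extend([pad] * (length - len(v2)))
--     dotProduct = 0
--     for i in range(0, length):
--         dotProduct += a[i] * b[i]
--     return dotProduct;
-- ===== SOURCE B (Python) =====
-- def pdp(v1, v2, pad):
--     m = min(len(v1), len(v2))
--     total = 0
--     for i in range(m):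
--         total += v1[i] * v2[i]
--     if len(v1) < len(v2):
--         for i in range(m, len(v2)):
--             total += pad * v2[i]
--     else:
--         for i in range(m, len(v1)):
--             total += v1[i] * pad
--     return total
-- ===== Notes on version B (the rewrite author's own statement) =====
-- stated objective: simpler
-- what changed: B drops A's padded-copy construction entirely: instead of building two length-max padded lists and scanning them, it keeps one running total over the common prefix and then adds the pad-multiplied tail of the longer vector in place, with no list allocation.
import Mathlib
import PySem

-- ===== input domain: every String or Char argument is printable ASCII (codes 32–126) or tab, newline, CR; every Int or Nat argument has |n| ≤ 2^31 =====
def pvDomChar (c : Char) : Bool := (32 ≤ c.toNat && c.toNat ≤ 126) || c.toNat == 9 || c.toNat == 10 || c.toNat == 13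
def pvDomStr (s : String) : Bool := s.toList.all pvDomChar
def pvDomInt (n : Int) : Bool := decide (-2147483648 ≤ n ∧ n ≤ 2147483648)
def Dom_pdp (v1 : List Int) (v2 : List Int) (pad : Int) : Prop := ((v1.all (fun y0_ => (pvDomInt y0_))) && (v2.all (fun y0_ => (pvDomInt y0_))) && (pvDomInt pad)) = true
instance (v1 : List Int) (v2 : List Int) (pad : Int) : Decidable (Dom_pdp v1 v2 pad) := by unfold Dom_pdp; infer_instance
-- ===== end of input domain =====

-- B replaces A's build-two-padded-copies-then-scan strategy with a single running total over
-- the common prefix followed by a pad-multiplied pass over the longer vector's tail (simpler; no allocation).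

-- ===== PORT A =====
-- All loop indices are provably in range of both padded lists, so pyGetD (default never used) is exact here.
def pdp (v1 : List Int) (v2 : List Int) (pad : Int) : Int :=
  let length : Nat := max v1.length v2.length
  let a : List Int := if v1.length < v2.length then v1 ++ List.replicate (length - v1.length) pad else v1
  let b : List Int := if v1.length < v2.length then v2 else v2 ++ List.replicate (length - v2.length) pad
  (PySem.List.pyRange 0 (length : Int) 1).foldl
    (fun s i => s + (PySem.List.pyGetD a i 0) * (PySem.List.pyGetD b i 0)) 0

-- ===== PORT B =====
def pdp_alt (v1 : List Int) (v2 : List Int) (pad : Int) : Int :=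
  let m : Nat := min v1.length v2.length
  let total : Int := (PySem.List.pyRange 0 (m : Int) 1).foldl
    (fun s i => s + (PySem.List.pyGetD v1 i 0) * (PySem.List.pyGetD v2 i 0)) 0
  if v1.length < v2.length then
    (PySem.List.pyRange (m : Int) (v2.length : Int) 1).foldl
      (fun s i => s + pad * (PySem.List.pyGetD v2 i 0)) total
  else
    (PySem.List.pyRange (m : Int) (v1.length : Int) 1).foldl
      (fun s i => s + (PySem.List.pyGetD v1 i 0) * pad) total

-- ===== PRECONDITION & SPEC =====
def Spec_pdp (v1 : List Int) (v2 : List Int) (pad : Int) (out : Int) : Prop := out = pdp_alt v1 v2 pad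
instance (v1 : List Int) (v2 : List Int) (pad : Int) (out : Int) : Decidable (Spec_pdp v1 v2 pad out) := by unfold Spec_pdp; infer_instance

-- ===== CLAIM (what is proved, stated in full; the proofs are below) =====
def Claim_equal_pdp : Prop := ∀ (v1 : List Int) (v2 : List Int) (pad : Int), Dom_pdp v1 v2 pad → Spec_pdp v1 v2 pad (pdp v1 v2 pad)

-- ===== LEMMAS AND PROOFS =====

-- indexing into the unpadded left part of a padded list
theorem pyGetD_append_left (xs ys : List Int) (i : Int) (h0 : 0 ≤ i) (h : i < xs.length) :
    PySem.List.pyGetD (xs ++ ys) i 0 = PySem.List.pyGetD xs i 0 := by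
  rw [PySem.List.pyGetD_eq_getElem _ 0 h0 (by simp; omega),
      PySem.List.pyGetD_eq_getElem _ 0 h0 h]
  exact List.getElem_append_left (by omega)

-- indexing into the replicate-pad tail gives pad
theorem pyGetD_append_replicate (xs : List Int) (k : Nat) (pad : Int) (i : Int)
    (h0 : (xs.length : Int) ≤ i) (h : i < xs.length + k) :
    PySem.List.pyGetD (xs ++ List.replicate k pad) i 0 = pad := by
  rw [PySem.List.pyGetD_eq_getElem _ 0 (by omega) (by simp; omega)]
  rw [List.getElem_append_right (by omega)]
  exact List.getElem_replicate _

theorem pdp_spec : Claim_equal_pdp := by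
  intro v1 v2 pad _
  unfold Spec_pdp pdp pdp_alt
  by_cases hlt : v1.length < v2.length
  · simp only [if_pos hlt]
    have hmax : max v1.length v2.length = v2.length := by omega
    have hmin : min v1.length v2.length = v1.length := by omega
    rw [hmax, hmin,
        PySem.List.pyRange_one_append 0 (v1.length : Int) (v2.length : Int)
          (by positivity) (by exact_mod_cast hlt.le),
        List.foldl_append]
    have hpre : List.foldl
        (fun s i => s + (PySem.List.pyGetD (v1 ++ List.replicate (v2.length - v1.length) pad) i 0) *
          (PySem.List.pyGetD v2 i 0)) 0 (PySem.List.pyRange 0 (v1.length : Int) 1)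
      = List.foldl (fun s i => s + (PySem.List.pyGetD v1 i 0) * (PySem.List.pyGetD v2 i 0)) 0
          (PySem.List.pyRange 0 (v1.length : Int) 1) := by
      refine PySem.List.foldl_congr_mem _ _ _ _ (fun s i hi => ?_)
      rw [PySem.List.mem_pyRange_one] at hi
      rw [pyGetD_append_left _ _ _ hi.1 (by exact_mod_cast hi.2)]
    rw [hpre]
    refine PySem.List.foldl_congr_mem _ _ _ _ (fun s i hi => ?_)
    rw [PySem.List.mem_pyRange_one] at hi
    rw [pyGetD_append_replicate _ _ _ _ hi.1 (by omega)]
  · simp only [if_neg hlt]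
    have hmax : max v1.length v2.length = v1.length := by omega
    have hmin : min v1.length v2.length = v2.length := by omega
    rw [hmax, hmin,
        PySem.List.pyRange_one_append 0 (v2.length : Int) (v1.length : Int)
          (by positivity) (by exact_mod_cast (by omega : v2.length ≤ v1.length)),
        List.foldl_append]
    have hpre : List.foldl
        (fun s i => s + (PySem.List.pyGetD v1 i 0) *
          (PySem.List.pyGetD (v2 ++ List.replicate (v1.length - v2.length) pad) i 0)) 0
          (PySem.List.pyRange 0 (v2.length : Int) 1)
      = List.foldl (fun s i => s + (PySem.List.pyGetD v1 i 0) * (PySem.List.pyGetD v2 i 0)) 0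
          (PySem.List.pyRange 0 (v2.length : Int) 1) := by
      refine PySem.List.foldl_congr_mem _ _ _ _ (fun s i hi => ?_)
      rw [PySem.List.mem_pyRange_one] at hi
      rw [pyGetD_append_left _ _ _ hi.1 (by exact_mod_cast hi.2)]
    rw [hpre]
    refine PySem.List.foldl_congr_mem _ _ _ _ (fun s i hi => ?_)
    rw [PySem.List.mem_pyRange_one] at hi
    rw [pyGetD_append_replicate _ _ _ _ hi.1 (by omega)]
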